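-- pv_equiv track=rewrite | github.com/Aljofey/Comprehensive-phishing-detection | extract_features_thirddataset.py | contains_leetspeak
-- ===== SOURCE A (Python) =====
-- def contains_leetspeak(url):
--     # Define a dictionary of leet-speak substitutions
--     leet_dict = {
--         'a': ['4', '@'],
--         'b': ['8', '6'],
--         'c': ['(', '{', '[', '<'],
--         'e': ['3'],
--         'g': ['9'],
--         'h': ['#'],
--         'i': ['1', '!', '|'],
--         'l': ['1', '|'],
--         'o': ['0'],
--         's': ['5', '$'],
--         't': ['7', '+'],
--         'z': ['2'],
--     }
--
--     # Convert the URL to lowercase for case-insensitive matching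
--     url_lower = url.lower()
--
--     # Check if any leet-speak substitutions are present in the URL
--     for char, substitutions in leet_dict.items():
--         for sub in substitutions:
--             if sub in url_lower:
--                 return 1
--
--     return 0
-- ===== SOURCE B (Python) =====
-- # One pass over the lowercased URL against a precomputed set of all substitution
-- # characters, instead of one substring scan per substitution character.
-- _LEET_SUBS = frozenset('4@86({[<39#1!|05$7+2')
--
-- def contains_leetspeak(url):
--     return 1 if any(c in _LEET_SUBS for c in url.lower()) else 0
-- ===== Notes on version B (the rewrite author's own statement) =====
-- stated objective: idiomatic
-- what changed: A scans the whole lowercased URL once per substitution character (22 substring searches); B flattens the substitution dict into one character set and makes a single pass over the URL's characters, testing set membership.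
import Mathlib
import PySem

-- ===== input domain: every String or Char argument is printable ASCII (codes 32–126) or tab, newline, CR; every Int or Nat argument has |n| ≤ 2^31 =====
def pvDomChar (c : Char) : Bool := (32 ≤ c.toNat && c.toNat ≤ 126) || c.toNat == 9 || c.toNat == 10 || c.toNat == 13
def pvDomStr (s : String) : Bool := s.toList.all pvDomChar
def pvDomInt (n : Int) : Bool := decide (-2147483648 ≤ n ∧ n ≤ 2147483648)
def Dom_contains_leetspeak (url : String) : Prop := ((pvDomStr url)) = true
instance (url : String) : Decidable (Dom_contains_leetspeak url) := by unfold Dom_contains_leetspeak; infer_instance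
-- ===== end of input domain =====

-- B flattens the leet-substitution dict into one character set and makes a single
-- pass over the lowercased URL's characters, instead of A's one substring scan per
-- substitution character (idiomatic; same result).


-- ===== PORT A =====
-- the leet_dict literal, in insertion order
def pvLeetDict : List (Char × List String) :=
  [('a', ["4", "@"]), ('b', ["8", "6"]), ('c', ["(", "{", "[", "<"]),
   ('e', ["3"]), ('g', ["9"]), ('h', ["#"]), ('i', ["1", "!", "|"]),
   ('l', ["1", "|"]), ('o', ["0"]), ('s', ["5", "$"]), ('t', ["7", "+"]),
   ('z', ["2"])]

-- inner loop: 'for sub in substitutions: if sub in url_lower: return 1'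
def pvInnerA (ulower : String) : List String → Bool
  | [] => false
  | sub :: rest => if PySem.Str.isIn sub ulower then true else pvInnerA ulower rest

-- outer loop over leet_dict.items(); falls through to 'return 0'
def pvOuterA (ulower : String) : List (Char × List String) → Int
  | [] => 0
  | (_, subs) :: rest => if pvInnerA ulower subs then 1 else pvOuterA ulower rest

def contains_leetspeak (url : String) : Int :=
  pvOuterA (PySem.Str.lower url) pvLeetDict

-- ===== PORT B =====
-- the flattened substitution-character set _LEET_SUBS (frozenset of distinct chars)
def pvLeetSubs : List Char :=
  ['4', '@', '8', '6', '(', '{', '[', '<', '3', '9', '#', '1', '!', '|', '0', '5', '$', '7', '+', '2']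

def contains_leetspeak_alt (url : String) : Int :=
  if (PySem.Str.lower url).toList.any (fun c => pvLeetSubs.contains c) then 1 else 0

-- ===== PRECONDITION & SPEC =====
def Spec_contains_leetspeak (url : String) (out : Int) : Prop := out = contains_leetspeak_alt url
instance (url : String) (out : Int) : Decidable (Spec_contains_leetspeak url out) := by unfold Spec_contains_leetspeak; infer_instance

-- ===== CLAIM (what is proved, stated in full; the proofs are below) =====
def Claim_equal_contains_leetspeak : Prop := ∀ (url : String), Dom_contains_leetspeak url → Spec_contains_leetspeak url (contains_leetspeak url)

-- ===== LEMMAS AND PROOFS =====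
theorem pvInnerA_eq_any (ul : String) (subs : List String) :
    pvInnerA ul subs = subs.any (fun s => PySem.Str.isIn s ul) := by
  induction subs with
  | nil => rfl
  | cons s rest ih => simp [pvInnerA, ih]

theorem pvOuterA_eq_if (ul : String) (d : List (Char × List String)) :
    pvOuterA ul d = if d.any (fun p => pvInnerA ul p.2) then 1 else 0 := by
  induction d with
  | nil => rfl
  | cons p rest ih =>
    obtain ⟨c, subs⟩ := p
    by_cases hI : pvInnerA ul subs = true
    · simp [pvOuterA, hI]
    · rw [Bool.not_eq_true] at hI
      simp only [pvOuterA, hI, if_false, Bool.false_eq_true, ih, List.any_cons, Bool.false_or]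

-- every substitution string in the dict is a single character drawn from the flat set
-- every substitution string in the dict is a single character drawn from the flat set
theorem pvDictSubsSingleton :
    pvLeetDict.all (fun p => p.2.all
      (fun sub => (pvLeetSubs.map (fun c => [c])).contains sub.toList)) = true := by
  decide

-- conversely, every character of the flat set occurs as a substitution string in the dict
theorem pvSubsInDict :
    pvLeetSubs.all (fun c => pvLeetDict.any
      (fun p => p.2.any (fun sub => sub.toList == [c]))) = true := by
  decide

theorem contains_leetspeak_spec' (url : String) :
    contains_leetspeak url = contains_leetspeak_alt url := by
  unfold contains_leetspeak contains_leetspeak_alt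
  rw [pvOuterA_eq_if]
  apply if_congr ?_ rfl rfl
  simp only [List.any_eq_true]
  constructor
  · rintro ⟨p, hp, hany⟩
    rw [pvInnerA_eq_any, List.any_eq_true] at hany
    obtain ⟨sub, hs, hin⟩ := hany
    have hsing := List.all_eq_true.mp (List.all_eq_true.mp pvDictSubsSingleton p hp) sub hs
    have hmem : sub.toList ∈ pvLeetSubs.map (fun c => [c]) := by simpa using hsing
    obtain ⟨c, hcS, hceq⟩ := List.mem_map.mp hmem
    have hinf := (PySem.Str.isIn_iff_infix _ _).mp hin
    rw [← hceq] at hinf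
    exact ⟨c, (List.singleton_infix_iff _ _).mp hinf, by simpa using hcS⟩
  · rintro ⟨c, hc, hS⟩
    obtain ⟨p, hp, hpa⟩ := List.any_eq_true.mp
      (List.all_eq_true.mp pvSubsInDict c (by simpa using hS))
    obtain ⟨sub, hs, hbeq⟩ := List.any_eq_true.mp hpa
    have hst : sub.toList = [c] := by simpa using hbeq
    refine ⟨p, hp, ?_⟩
    rw [pvInnerA_eq_any, List.any_eq_true]
    exact ⟨sub, hs, (PySem.Str.isIn_iff_infix _ _).mpr
      (by rw [hst]; exact (List.singleton_infix_iff _ _).mpr hc)⟩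

-- ===== VERDICT (by name: the statement is the Claim_ definition above) =====
theorem contains_leetspeak_spec : Claim_equal_contains_leetspeak := by
  intro url _
  exact contains_leetspeak_spec' url
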